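-- pv_equiv track=rewrite | github.com/aidenwalkerwsu/cs-315-projects | pairs.py | filter_data_pairs
-- ===== SOURCE A (Python) =====
-- def create_pairs(data: list) -> list :
--     cand_pairs = []
--
--     # go through each element
--     for i in range(0,len(data)) :
--         # go through every element after first
--         for j in range(i+1,len(data)) :
--             cand_pairs.append((data[i], data[j]))
--
--     return cand_pairs
--
-- def filter_data_pairs(data: list, freq_pairs: dict) -> list :
--     # goes through all lines in data
--     for bucket in data :
--         # creates the possible pairs for the bucket
--         pairs = create_pairs(bucket)
--
--         # the items which are in frequent pairs so it can remove
--         save_list = []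
--
--         # goes through all pairs
--         for pair in pairs :
--             if freq_pairs.get((pair[0], pair[1])) != None or freq_pairs.get((pair[1], pair[0])) != None :
--                 if pair[0] not in save_list :
--                     save_list.append(pair[0])
--                 if pair[1] not in save_list :
--                     save_list.append(pair[1])
--
--         index = 0
--         while index < len(bucket) :
--             if bucket[index] not in save_list :
--                 del bucket[index]
--             else :
--                 index += 1
--
--         if bucket == [] :
--             del bucket
--     return data
-- ===== SOURCE B (Python) =====
-- def filter_data_pairs(data: list, freq_pairs: dict) -> list:
--     # Note: like A, mutates each bucket of data in place (bucket[:] = ...).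
--     for bucket in data:
--         # one pass: multiplicity index of the bucket
--         counts = {}
--         for x in bucket:
--             counts[x] = counts.get(x, 0) + 1
--         # iterate over the frequent-pair keys instead of over all bucket pairs
--         save = set()
--         for (a, b) in freq_pairs:
--             if a != b:
--                 if a in counts and b in counts:
--                     save.add(a)
--                     save.add(b)
--             elif counts.get(a, 0) >= 2:
--                 save.add(a)
--         bucket[:] = [x for x in bucket if x in save]
--     return data
-- ===== Notes on version B (the rewrite author's own statement) =====
-- stated objective: faster
-- what changed: Instead of enumerating all O(n^2) element pairs of each bucket and scanning a growing save_list per pair, B builds a one-pass multiplicity index of the bucket and makes a single scan over freq_pairs' keys (a,b), saving both elements when both occur (a itself needing multiplicity >= 2 when a == b), then filters the bucket by set membership.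
import Mathlib
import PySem

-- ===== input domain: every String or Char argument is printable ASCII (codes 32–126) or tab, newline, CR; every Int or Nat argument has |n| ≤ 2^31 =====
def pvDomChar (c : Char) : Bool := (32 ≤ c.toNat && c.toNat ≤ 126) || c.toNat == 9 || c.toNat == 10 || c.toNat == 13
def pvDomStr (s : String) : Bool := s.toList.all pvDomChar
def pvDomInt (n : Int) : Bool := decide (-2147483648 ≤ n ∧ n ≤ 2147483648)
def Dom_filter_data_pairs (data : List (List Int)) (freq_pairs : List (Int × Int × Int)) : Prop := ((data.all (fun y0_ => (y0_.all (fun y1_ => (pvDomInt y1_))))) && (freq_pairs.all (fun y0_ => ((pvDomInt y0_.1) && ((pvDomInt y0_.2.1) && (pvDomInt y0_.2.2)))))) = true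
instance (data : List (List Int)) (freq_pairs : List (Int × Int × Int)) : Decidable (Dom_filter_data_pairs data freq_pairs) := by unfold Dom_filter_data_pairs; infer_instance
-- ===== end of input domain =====

-- B replaces A's quadratic all-pairs enumeration per bucket by a one-pass multiplicity
-- index plus a single scan of freq_pairs' keys (objective: faster). Like A, the Python B
-- mutates each bucket of data in place; the equivalence proved here is about the return value.

-- ===== PORT A =====
-- dict.get((a,b)) on the freq_pairs association list: first matching key
def fpGet (fp : List (Int × Int × Int)) (a b : Int) : Option Int :=
  (fp.find? (fun t => t.1 == a && t.2.1 == b)).map (fun t => t.2.2)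

-- A's create_pairs: nested index loops (indices are always in range; pyGetD for totality)
def create_pairs (l : List Int) : List (Int × Int) :=
  (PySem.List.pyRange 0 (PySem.List.len l)).foldl (fun acc i =>
    (PySem.List.pyRange (i+1) (PySem.List.len l)).foldl (fun acc2 j =>
      acc2 ++ [(PySem.List.pyGetD l i 0, PySem.List.pyGetD l j 0)]) acc) []

-- A's save_list loop: append pair[0] / pair[1] if not already present
def saveLoop (fp : List (Int × Int × Int)) (pairs : List (Int × Int)) : List Int :=
  pairs.foldl (fun sl p =>
    if (fpGet fp p.1 p.2).isSome || (fpGet fp p.2 p.1).isSome then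
      let sl1 := if sl.contains p.1 then sl else sl ++ [p.1]
      if sl1.contains p.2 then sl1 else sl1 ++ [p.2]
    else sl) []

-- A's while/del loop: each step either deletes the current element or advances the index
def delLoop (save : List Int) : List Int → List Int
  | [] => []
  | x :: xs => if save.contains x then x :: delLoop save xs else delLoop save xs

def filter_data_pairs (data : List (List Int)) (freq_pairs : List (Int × Int × Int)) : List (List Int) :=
  data.map (fun bucket => delLoop (saveLoop freq_pairs (create_pairs bucket)) bucket)

-- ===== PORT B =====
-- counts = {}; for x in bucket: counts[x] = counts.get(x, 0) + 1
def bCounts (bucket : List Int) : PySem.Dict Int Int :=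
  bucket.foldl (fun d x => d.insert x (d.getD x 0 + 1)) PySem.Dict.empty

-- save = set(); one scan over freq_pairs' keys
def bSave (counts : PySem.Dict Int Int) (fp : List (Int × Int × Int)) : PySem.Set Int :=
  fp.foldl (fun s t =>
    if t.1 ≠ t.2.1 then
      if counts.contains t.1 && counts.contains t.2.1 then
        PySem.Set.add (PySem.Set.add s t.1) t.2.1
      else s
    else if 2 ≤ counts.getD t.1 0 then PySem.Set.add s t.1 else s) PySem.Set.empty

def filter_data_pairs_alt (data : List (List Int)) (freq_pairs : List (Int × Int × Int)) : List (List Int) :=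
  data.map (fun bucket =>
    let counts := bCounts bucket
    let save := bSave counts freq_pairs
    bucket.filter (fun x => PySem.Set.contains save x))

-- ===== PRECONDITION & SPEC =====
def Spec_filter_data_pairs (data : List (List Int)) (freq_pairs : List (Int × Int × Int)) (out : List (List Int)) : Prop := out = filter_data_pairs_alt data freq_pairs
instance (data : List (List Int)) (freq_pairs : List (Int × Int × Int)) (out : List (List Int)) : Decidable (Spec_filter_data_pairs data freq_pairs out) := by unfold Spec_filter_data_pairs; infer_instance

-- ===== CLAIM (what is proved, stated in full; the proofs are below) =====
def Claim_equal_filter_data_pairs : Prop := ∀ (data : List (List Int)) (freq_pairs : List (Int × Int × Int)), Dom_filter_data_pairs data freq_pairs → Spec_filter_data_pairs data freq_pairs (filter_data_pairs data freq_pairs)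

-- ===== LEMMAS AND PROOFS =====

-- structural form of create_pairs
def pairsOf : List Int → List (Int × Int)
  | [] => []
  | h :: t => t.map (fun y => (h, y)) ++ pairsOf t

theorem flatMap_range_eq_pairsOf (l : List Int) :
    (List.range l.length).flatMap (fun k => (l.drop (k+1)).map (fun y => (l.getD k 0, y))) = pairsOf l := by
  induction l with
  | nil => simp [pairsOf]
  | cons h t ih =>
    simp only [List.length_cons, List.range_succ_eq_map, List.flatMap_cons, List.flatMap_map,
      Nat.succ_eq_add_one, List.drop_succ_cons, List.getD_cons_succ, List.getD_cons_zero,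
      List.drop_zero, pairsOf]
    rw [← ih]

theorem create_pairs_eq_pairsOf (l : List Int) : create_pairs l = pairsOf l := by
  unfold create_pairs
  rw [PySem.List.foldl_congr_mem _ _
      (fun acc i => acc ++ ((l.drop (i+1).toNat).map (fun y => (PySem.List.pyGetD l i 0, y)))) _ ?_]
  · rw [PySem.List.foldl_append_eq_flatMap, List.nil_append]
    rw [PySem.List.pyRange_one, List.flatMap_map]
    rw [PySem.List.len_eq]
    simp only [Int.sub_zero, Int.toNat_natCast, zero_add]
    rw [← flatMap_range_eq_pairsOf]
    apply List.flatMap_congr  -- pointwise over range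
    intro k _
    have h1 : ((k : Int) + 1).toNat = k + 1 := by omega
    rw [h1, PySem.List.pyGetD_natCast]
  · intro acc i hi
    have h0 : (0:Int) ≤ i := (PySem.List.mem_pyRange_one.mp hi).1
    rw [PySem.List.foldl_pyRange_pyGetD l 0 (fun acc2 y => acc2 ++ [(PySem.List.pyGetD l i 0, y)]) acc (by omega)]
    rw [PySem.List.foldl_append_singleton_eq_map]

theorem mem_pairsOf (a b : Int) (l : List Int) :
    (a, b) ∈ pairsOf l ↔ [a, b].Sublist l := by
  induction l with
  | nil => simp [pairsOf]
  | cons h t ih =>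
    simp only [pairsOf, List.mem_append, List.mem_map, ih, List.sublist_cons_iff]
    constructor
    · rintro (⟨y, hy, he⟩ | hs)
      · injection he with h1 h2
        subst h1; subst h2
        exact Or.inr ⟨[y], rfl, List.singleton_sublist.mpr hy⟩
      · exact Or.inl hs
    · rintro (hs | ⟨r, hr, hrs⟩)
      · exact Or.inr hs
      · cases hr
        exact Or.inl ⟨b, List.singleton_sublist.mp hrs, rfl⟩

theorem pair_sublist_of_mem (a b : Int) (l : List Int) (hne : a ≠ b)
    (ha : a ∈ l) (hb : b ∈ l) : [a, b].Sublist l ∨ [b, a].Sublist l := by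
  induction l with
  | nil => cases ha
  | cons h t ih =>
    by_cases hah : a = h
    · subst hah
      have hbt : b ∈ t := by rcases List.mem_cons.mp hb with h1 | h1; exacts [absurd h1.symm hne, h1]
      exact Or.inl ((List.cons_sublist_cons).mpr (List.singleton_sublist.mpr hbt))
    · by_cases hbh : b = h
      · subst hbh
        have hat : a ∈ t := by rcases List.mem_cons.mp ha with h1 | h1; exacts [absurd h1 hah, h1]
        exact Or.inr ((List.cons_sublist_cons).mpr (List.singleton_sublist.mpr hat))
      · have hat : a ∈ t := by rcases List.mem_cons.mp ha with h1 | h1; exacts [absurd h1 hah, h1]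
        have hbt : b ∈ t := by rcases List.mem_cons.mp hb with h1 | h1; exacts [absurd h1 hbh, h1]
        rcases ih hat hbt with h1 | h1
        · exact Or.inl (h1.cons h)
        · exact Or.inr (h1.cons h)

-- membership in A's save_list
def hitA (fp : List (Int × Int × Int)) (p : Int × Int) : Bool :=
  (fpGet fp p.1 p.2).isSome || (fpGet fp p.2 p.1).isSome

theorem mem_append_cond (sl : List Int) (c x : Int) :
    x ∈ (if sl.contains c then sl else sl ++ [c]) ↔ x ∈ sl ∨ x = c := by
  split_ifs with h
  · simp only [List.contains_iff_mem] at h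
    constructor
    · exact Or.inl
    · rintro (h1 | rfl) <;> [exact h1; exact h]
  · simp [List.mem_append]

theorem mem_saveLoop_aux (fp : List (Int × Int × Int)) (pairs : List (Int × Int))
    (acc : List Int) (x : Int) :
    x ∈ pairs.foldl (fun sl p =>
      if (fpGet fp p.1 p.2).isSome || (fpGet fp p.2 p.1).isSome then
        let sl1 := if sl.contains p.1 then sl else sl ++ [p.1]
        if sl1.contains p.2 then sl1 else sl1 ++ [p.2]
      else sl) acc ↔ x ∈ acc ∨ ∃ p ∈ pairs, hitA fp p ∧ (x = p.1 ∨ x = p.2) := by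
  induction pairs generalizing acc with
  | nil => simp
  | cons p ps ih =>
    rw [List.foldl_cons, ih]
    have hstep : x ∈ (if (fpGet fp p.1 p.2).isSome || (fpGet fp p.2 p.1).isSome then
        let sl1 := if acc.contains p.1 then acc else acc ++ [p.1]
        if sl1.contains p.2 then sl1 else sl1 ++ [p.2]
      else acc) ↔ x ∈ acc ∨ (hitA fp p ∧ (x = p.1 ∨ x = p.2)) := by
      unfold hitA
      by_cases hif : ((fpGet fp p.1 p.2).isSome || (fpGet fp p.2 p.1).isSome) = true
      · rw [if_pos hif]
        simp only [hif, true_and]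
        show x ∈ (if (if acc.contains p.1 then acc else acc ++ [p.1]).contains p.2 then
            (if acc.contains p.1 then acc else acc ++ [p.1])
          else (if acc.contains p.1 then acc else acc ++ [p.1]) ++ [p.2]) ↔ x ∈ acc ∨ (x = p.1 ∨ x = p.2)
        rw [mem_append_cond, mem_append_cond]
        tauto
      · rw [if_neg hif]
        simp [hif]
    rw [hstep]
    simp only [List.mem_cons]
    constructor
    · rintro ((h1 | h1) | ⟨q, hq, h2⟩)
      · exact Or.inl h1
      · exact Or.inr ⟨p, Or.inl rfl, h1⟩
      · exact Or.inr ⟨q, Or.inr hq, h2⟩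
    · rintro (h1 | ⟨q, (rfl | hq), h2⟩)
      · exact Or.inl (Or.inl h1)
      · exact Or.inl (Or.inr h2)
      · exact Or.inr ⟨q, hq, h2⟩

theorem mem_saveLoop (fp : List (Int × Int × Int)) (pairs : List (Int × Int)) (x : Int) :
    x ∈ saveLoop fp pairs ↔ ∃ p ∈ pairs, hitA fp p ∧ (x = p.1 ∨ x = p.2) := by
  unfold saveLoop
  rw [mem_saveLoop_aux]
  simp

-- membership in B's save set
def condB (counts : PySem.Dict Int Int) (t : Int × Int × Int) (x : Int) : Prop :=
  (t.1 ≠ t.2.1 ∧ counts.contains t.1 ∧ counts.contains t.2.1 ∧ (x = t.1 ∨ x = t.2.1)) ∨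
  (t.1 = t.2.1 ∧ 2 ≤ counts.getD t.1 0 ∧ x = t.1)

theorem mem_bSave_aux (counts : PySem.Dict Int Int) (fp : List (Int × Int × Int))
    (acc : PySem.Set Int) (x : Int) :
    x ∈ fp.foldl (fun s t =>
      if t.1 ≠ t.2.1 then
        if counts.contains t.1 && counts.contains t.2.1 then
          PySem.Set.add (PySem.Set.add s t.1) t.2.1
        else s
      else if 2 ≤ counts.getD t.1 0 then PySem.Set.add s t.1 else s) acc ↔
    x ∈ acc ∨ ∃ t ∈ fp, condB counts t x := by
  induction fp generalizing acc with
  | nil => simp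
  | cons t ts ih =>
    rw [List.foldl_cons, ih]
    have hstep : x ∈ (if t.1 ≠ t.2.1 then
        if counts.contains t.1 && counts.contains t.2.1 then
          PySem.Set.add (PySem.Set.add acc t.1) t.2.1
        else acc
      else if 2 ≤ counts.getD t.1 0 then PySem.Set.add acc t.1 else acc) ↔
        x ∈ acc ∨ condB counts t x := by
      unfold condB
      split_ifs with h1 h2 h3
      · simp only [Bool.and_eq_true] at h2
        rw [PySem.Set.mem_add, PySem.Set.mem_add]
        tauto
      · simp only [Bool.and_eq_true, not_and_or, Bool.not_eq_true] at h2
        constructor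
        · tauto
        · rintro (h | h)
          · exact h
          · rcases h with ⟨_, hca, hcb, _⟩ | ⟨he, _, _⟩
            · rcases h2 with h2 | h2 <;> simp_all
            · exact absurd he h1
      · rw [PySem.Set.mem_add]; push Not at h1; tauto
      · push Not at h1
        constructor
        · tauto
        · rintro (h | h)
          · exact h
          · rcases h with ⟨hne, _⟩ | ⟨_, hcnt, _⟩
            · exact absurd h1 hne
            · exact absurd hcnt h3
    rw [hstep]
    simp only [List.mem_cons]
    constructor
    · rintro ((h1 | h1) | ⟨q, hq, h2⟩)
      · exact Or.inl h1
      · exact Or.inr ⟨t, Or.inl rfl, h1⟩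
      · exact Or.inr ⟨q, Or.inr hq, h2⟩
    · rintro (h1 | ⟨q, (rfl | hq), h2⟩)
      · exact Or.inl (Or.inl h1)
      · exact Or.inl (Or.inr h2)
      · exact Or.inr ⟨q, hq, h2⟩

theorem mem_bSave (counts : PySem.Dict Int Int) (fp : List (Int × Int × Int)) (x : Int) :
    x ∈ bSave counts fp ↔ ∃ t ∈ fp, condB counts t x := by
  unfold bSave
  rw [mem_bSave_aux]
  simp [PySem.Set.empty]

theorem fpGet_isSome_iff (fp : List (Int × Int × Int)) (a b : Int) :
    (fpGet fp a b).isSome ↔ ∃ v, (a, b, v) ∈ fp := by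
  simp only [fpGet, Option.isSome_map, List.find?_isSome, Bool.and_eq_true, beq_iff_eq]
  constructor
  · rintro ⟨⟨a', b', v⟩, hm, h1, h2⟩
    dsimp at h1 h2; subst h1; subst h2; exact ⟨v, hm⟩
  · rintro ⟨v, hm⟩; exact ⟨(a, b, v), hm, rfl, rfl⟩

theorem contains_counter_iff (bucket : List Int) (a : Int) :
    (PySem.Dict.counter bucket).contains a = true ↔ a ∈ bucket := by
  rw [PySem.Dict.contains_counter, List.contains_iff_mem]

theorem count_counter_iff (bucket : List Int) (a : Int) :
    2 ≤ (PySem.Dict.counter bucket).getD a 0 ↔ 2 ≤ bucket.count a := by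
  rw [PySem.Dict.getD_counter]; exact_mod_cast Iff.rfl

theorem double_sublist_iff (a : Int) (l : List Int) :
    [a, a].Sublist l ↔ 2 ≤ l.count a := by
  have : ([a, a] : List Int) = List.replicate 2 a := rfl
  rw [this, List.replicate_sublist_iff]

theorem save_iff (fp : List (Int × Int × Int)) (bucket : List Int) (x : Int) :
    x ∈ saveLoop fp (create_pairs bucket) ↔ x ∈ bSave (PySem.Dict.counter bucket) fp := by
  rw [mem_saveLoop, mem_bSave]
  constructor
  · rintro ⟨⟨a, b⟩, hp, hhit, hx⟩
    rw [create_pairs_eq_pairsOf, mem_pairsOf] at hp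
    simp only [hitA, Bool.or_eq_true] at hhit
    dsimp at hx
    have hhit' : (∃ v, (a, b, v) ∈ fp) ∨ (∃ v, (b, a, v) ∈ fp) := by
      rcases hhit with h | h
      · exact Or.inl ((fpGet_isSome_iff fp a b).mp h)
      · exact Or.inr ((fpGet_isSome_iff fp b a).mp h)
    by_cases hab : a = b
    · subst hab
      have hcnt : 2 ≤ bucket.count a := (double_sublist_iff a bucket).mp hp
      have hxa : x = a := by tauto
      rcases hhit' with ⟨v, hv⟩ | ⟨v, hv⟩ <;>
        exact ⟨(a, a, v), hv, Or.inr ⟨rfl, (count_counter_iff bucket a).mpr hcnt, hxa⟩⟩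
    · have ha : a ∈ bucket := hp.subset (by simp)
      have hb : b ∈ bucket := hp.subset (by simp)
      rcases hhit' with ⟨v, hv⟩ | ⟨v, hv⟩
      · exact ⟨(a, b, v), hv, Or.inl ⟨hab, (contains_counter_iff bucket a).mpr ha,
          (contains_counter_iff bucket b).mpr hb, hx⟩⟩
      · exact ⟨(b, a, v), hv, Or.inl ⟨fun h => hab h.symm, (contains_counter_iff bucket b).mpr hb,
          (contains_counter_iff bucket a).mpr ha, hx.symm⟩⟩
  · rintro ⟨⟨a, b, v⟩, hv, hcond⟩
    rcases hcond with ⟨hne, hca, hcb, hx⟩ | ⟨heq, hcnt, hx⟩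
    · dsimp at hne hca hcb hx
      have ha : a ∈ bucket := (contains_counter_iff bucket a).mp hca
      have hb : b ∈ bucket := (contains_counter_iff bucket b).mp hcb
      rcases pair_sublist_of_mem a b bucket hne ha hb with hs | hs
      · refine ⟨(a, b), ?_, ?_, hx⟩
        · rw [create_pairs_eq_pairsOf, mem_pairsOf]; exact hs
        · simp only [hitA, Bool.or_eq_true]
          exact Or.inl ((fpGet_isSome_iff fp a b).mpr ⟨v, hv⟩)
      · refine ⟨(b, a), ?_, ?_, hx.symm⟩
        · rw [create_pairs_eq_pairsOf, mem_pairsOf]; exact hs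
        · simp only [hitA, Bool.or_eq_true]
          exact Or.inr ((fpGet_isSome_iff fp a b).mpr ⟨v, hv⟩)
    · dsimp at heq hcnt hx
      subst heq
      have hcnt' : 2 ≤ bucket.count a := (count_counter_iff bucket a).mp hcnt
      refine ⟨(a, a), ?_, ?_, Or.inl hx⟩
      · rw [create_pairs_eq_pairsOf, mem_pairsOf]
        exact (double_sublist_iff a bucket).mpr hcnt'
      · simp only [hitA, Bool.or_eq_true]
        exact Or.inl ((fpGet_isSome_iff fp a a).mpr ⟨v, hv⟩)

theorem delLoop_eq_filter (s l : List Int) : delLoop s l = l.filter (fun x => s.contains x) := by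
  induction l with
  | nil => rfl
  | cons h t ih => by_cases hc : h ∈ s <;> simp [delLoop, List.filter, hc, ih]

-- ===== VERDICT (by name: the statement is the Claim_ definition above) =====
theorem filter_data_pairs_spec : Claim_equal_filter_data_pairs := by
  intro data fp _
  unfold Spec_filter_data_pairs filter_data_pairs filter_data_pairs_alt
  apply List.map_congr_left
  intro bucket _
  rw [delLoop_eq_filter]
  have hc : bCounts bucket = PySem.Dict.counter bucket :=
    PySem.Dict.foldl_insert_getD_add_one_eq_counter bucket
  apply List.filter_congr
  intro y _
  have h := save_iff fp bucket y
  rw [← List.contains_iff_mem, ← PySem.Set.contains_iff] at h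
  rw [hc]
  exact Bool.eq_iff_iff.mpr h
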